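-- pv_equiv track=rewrite | github.com/Vadelevich/TestTask | task_2.py | row_sum
-- ===== SOURCE A (Python) =====
-- def row_sum(n: int):
--     """ Функция считает сумму н-го ряда пирамиды нечетных чисел (начало с 1)"""
--     prev_row: list[int] = []  # Список чисел до требуемого ряда
--     n_row: list[int] = []  # Список чисел который будем суммировать (н-ый ряд)
--
--     if n > 1:  # Если нет, сразу вернем 1
--         for i in range(1, n * (n - 1),
--                        2):  # step = 2, так как используется нечетная последовательность чисел, n*(n-1) выход из цикла не доходя последнего ряда
--             prev_row.append(i)
--
--         for i in range(prev_row[-1] + 2, prev_row[-1] + (n * 2) + 2,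
--                        2):  # prev_row - узнаем последнее число на котором остановились (первый член n-го ряда)
--             n_row.append(i)  #
--     else:  #
--         n_row.append(n)  #
--
--     return sum(n_row)  # в n_row хранятся члены исключительно n-го ряда,посчитаем сумму
--
-- list = [0, 0, 0, 1, 2, 6, 4, 3, 6]
-- ===== SOURCE B (Python) =====
-- def row_sum(n: int):
--     """Sum of the n-th row of the odd-number pyramid, by closed form: n**3."""
--     return n ** 3 if n > 1 else n
-- ===== Notes on version B (the rewrite author's own statement) =====
-- stated objective: faster
-- what changed: Replaces the two range-building loops and the sum by the closed form n**3 (returning n unchanged for n <= 1, as A does).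
import Mathlib
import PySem

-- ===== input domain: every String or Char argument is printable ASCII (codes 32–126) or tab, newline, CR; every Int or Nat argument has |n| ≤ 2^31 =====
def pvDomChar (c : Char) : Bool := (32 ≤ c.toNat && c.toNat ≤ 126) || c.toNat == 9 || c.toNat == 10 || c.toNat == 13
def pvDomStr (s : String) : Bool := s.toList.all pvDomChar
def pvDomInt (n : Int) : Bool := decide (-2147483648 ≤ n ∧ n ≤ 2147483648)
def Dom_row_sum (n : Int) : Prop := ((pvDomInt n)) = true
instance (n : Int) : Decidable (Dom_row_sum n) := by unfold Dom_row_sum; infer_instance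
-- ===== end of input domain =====

-- B replaces A's two range-building loops and the final sum by the closed form n**3 (faster, O(1) vs O(n^2)).


-- ===== PORT A =====
-- literal transliteration: the two append-loops become foldl appends over the same ranges;
-- prev_row[-1] is pyGet? at -1 (nonempty whenever n > 1, so the .getD 0 default is never used)
def row_sum (n : Int) : Int :=
  if n > 1 then
    let prev_row : List Int :=
      (PySem.List.pyRange 1 (n * (n - 1)) 2).foldl (fun acc i => acc ++ [i]) []
    let last : Int := (PySem.List.pyGet? prev_row (-1)).getD 0
    let n_row : List Int :=
      (PySem.List.pyRange (last + 2) (last + n * 2 + 2) 2).foldl (fun acc i => acc ++ [i]) []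
    n_row.sum
  else
    ([n] : List Int).sum

-- ===== PORT B =====
def row_sum_alt (n : Int) : Int :=
  if n > 1 then n ^ 3 else n

-- ===== PRECONDITION & SPEC =====
def Spec_row_sum (n : Int) (out : Int) : Prop := out = row_sum_alt n
instance (n : Int) (out : Int) : Decidable (Spec_row_sum n out) := by unfold Spec_row_sum; infer_instance

-- ===== CLAIM (what is proved, stated in full; the proofs are below) =====
def Claim_equal_row_sum : Prop := ∀ (n : Int), Dom_row_sum n → Spec_row_sum n (row_sum n)

-- ===== LEMMAS AND PROOFS =====

theorem foldl_append_id {α : Type} (l acc : List α) :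
    l.foldl (fun a i => a ++ [i]) acc = acc ++ l := by
  induction l generalizing acc with
  | nil => simp
  | cons x xs ih => simp [List.foldl, ih]

theorem sum_map_affine (a : Int) (m : Nat) :
    (((List.range m).map (fun k : Nat => a + 2 * (k : Int))).sum) = m * a + m * ((m : Int) - 1) := by
  induction m with
  | zero => simp
  | succ m ih =>
    rw [List.range_succ]
    simp only [List.map_append, List.sum_append, List.map_cons, List.map_nil,
      List.sum_cons, List.sum_nil, ih]
    push_cast
    ring

theorem row_sum_eq_cube (n : Int) (hn : 1 < n) : row_sum n = n ^ 3 := by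
  obtain ⟨N, rfl⟩ : ∃ N : Nat, n = (N : Int) := ⟨n.toNat, by omega⟩
  have hN : 2 ≤ N := by exact_mod_cast hn
  have hNI : (2 : Int) ≤ (N : Int) := by exact_mod_cast hN
  obtain ⟨M, hM⟩ : ∃ M : Nat, N * (N - 1) = 2 * M := by
    obtain ⟨c, hc⟩ := Nat.even_mul_pred_self N
    exact ⟨c, by omega⟩
  have h2MI : (N : Int) * ((N : Int) - 1) = 2 * (M : Int) := by
    have h1 : ((N : Int)) - 1 = ((N - 1 : Nat) : Int) := by omega
    rw [h1]; exact_mod_cast hM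
  have hMpos : 0 < M := by
    have h0 : (0 : Int) < (M : Int) := by nlinarith
    exact_mod_cast h0
  have hb1 : (1 : Int) < (N : Int) * ((N : Int) - 1) := by nlinarith
  have hcnt1 : (((N : Int) * ((N : Int) - 1) - 1 + 2 - 1) / 2).toNat = M := by
    rw [show ((N : Int) * ((N : Int) - 1) - 1 + 2 - 1) = (N : Int) * ((N : Int) - 1) by ring,
      h2MI]
    omega
  -- prev_row[-1] = 1 + 2*(M-1)
  have hlast : (PySem.List.pyGet?
      ((List.range M).map (fun k : Nat => (1 : Int) + 2 * (k : Int))) (-1)).getD 0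
      = 1 + 2 * ((M : Int) - 1) := by
    rw [PySem.List.pyGet?_neg_one, List.getLast?_eq_getElem?, List.length_map,
      List.length_range]
    rw [List.getElem?_eq_getElem (by simp; omega)]
    simp only [Option.getD_some, List.getElem_map, List.getElem_range]
    omega
  have hlt : (1 : Int) + 2 * ((M : Int) - 1) + 2
      < 1 + 2 * ((M : Int) - 1) + (N : Int) * 2 + 2 := by linarith
  have hcnt2 : (((1 : Int) + 2 * ((M : Int) - 1) + (N : Int) * 2 + 2
      - ((1 : Int) + 2 * ((M : Int) - 1) + 2) + 2 - 1) / 2).toNat = N := by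
    rw [show ((1 : Int) + 2 * ((M : Int) - 1) + (N : Int) * 2 + 2
      - ((1 : Int) + 2 * ((M : Int) - 1) + 2) + 2 - 1) = 2 * (N : Int) + 1 by ring]
    omega
  unfold row_sum
  rw [if_pos hn]
  simp only [PySem.List.pyRange_of_pos _ _ (show (0 : Int) < 2 by norm_num),
    if_pos hb1, hcnt1, foldl_append_id, List.nil_append, hlast, if_pos hlt, hcnt2,
    sum_map_affine]
  have ha : (1 : Int) + 2 * ((M : Int) - 1) + 2 = (N : Int) * ((N : Int) - 1) + 1 := by
    linarith
  rw [ha]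
  ring

-- ===== VERDICT (by name: the statement is the Claim_ definition above) =====
theorem row_sum_spec : Claim_equal_row_sum := by
  intro n _
  unfold Spec_row_sum row_sum_alt
  by_cases h : 1 < n
  · rw [if_pos h, row_sum_eq_cube n h]
  · rw [if_neg h]
    unfold row_sum
    rw [if_neg h]
    simp
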